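-- pv_equiv track=rewrite | github.com/Luka-stack/daily_coding_challenge | data_structures/hash_tables/problem_2.py | fewest_cuts
-- ===== SOURCE A (Python) =====
-- from collections import defaultdict
--
-- def fewest_cuts(wall):
-- 	cuts = defaultdict(int)
--
-- 	for row in wall:
-- 		length = 0
--
-- 		for brick in row[:-1]:
-- 			length += brick
-- 			cuts[length] += 1
--
-- 	return len(wall) - max(cuts.values())
-- ===== SOURCE B (Python) =====
-- def fewest_cuts(wall):
--     # collect every interior edge position, sort, scan runs of equal values
--     edges = []
--     for row in wall:
--         total = 0
--         for brick in row[:-1]: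
--             total += brick
--             edges.append(total)
--     edges.sort()
--     best = 0
--     run = 0
--     prev = None
--     for e in edges:
--         if e == prev:
--             run += 1
--         else:
--             run = 1
--             prev = e
--         if run > best:
--             best = run
--     return len(wall) - best
-- ===== Notes on version B (the rewrite author's own statement) =====
-- stated objective: alternative
-- what changed: Replaces the defaultdict edge-counter with flatten-all-edge-positions, sort once, then a single run-length scan tracking the longest run of equal edge positions; also returns len(wall) instead of raising where there are no interior edges.
-- crash fix: On walls where every row has at most one brick there are no interior edges and A raises ValueError (max() of empty sequence); B returns len(wall), the number of rows any vertical cut crosses. — e.g. on fewest_cuts([[5], [3]]): A raises ValueError, B returns 2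
import Mathlib
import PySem

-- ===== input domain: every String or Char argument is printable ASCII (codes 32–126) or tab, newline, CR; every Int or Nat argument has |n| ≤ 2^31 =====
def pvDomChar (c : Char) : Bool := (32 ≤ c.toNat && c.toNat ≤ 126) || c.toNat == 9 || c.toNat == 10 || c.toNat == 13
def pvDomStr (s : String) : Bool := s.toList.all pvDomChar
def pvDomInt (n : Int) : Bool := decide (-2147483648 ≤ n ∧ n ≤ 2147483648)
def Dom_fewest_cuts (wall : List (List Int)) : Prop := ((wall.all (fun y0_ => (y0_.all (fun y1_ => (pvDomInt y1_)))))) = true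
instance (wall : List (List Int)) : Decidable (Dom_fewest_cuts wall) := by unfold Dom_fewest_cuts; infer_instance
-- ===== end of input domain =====

-- B replaces the dict counter with sort-then-scan over the flattened edge positions (alternative algorithm, same result where A returns).

-- ===== PORT A =====
def fewest_cuts (wall : List (List Int)) : Int :=
  let cuts : PySem.Dict Int Int :=
    wall.foldl (fun cuts row =>
      ((PySem.List.slice row none (some (-1))).foldl
        (fun (st : Int × PySem.Dict Int Int) brick =>
          (st.1 + brick, st.2.modify (st.1 + brick) 0 (· + 1)))
        (0, cuts)).2)
      PySem.Dict.empty
  -- max() of an empty sequence raises ValueError in Python: Pre_ excludes that case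
  (wall.length : Int) - (PySem.List.max? cuts.values (fun v => v)).getD 0

-- ===== PORT B =====
def fewest_cuts_alt (wall : List (List Int)) : Int :=
  let edges : List Int :=
    wall.foldl (fun edges row =>
      ((PySem.List.slice row none (some (-1))).foldl
        (fun (st : Int × List Int) brick =>
          (st.1 + brick, st.2 ++ [st.1 + brick]))
        (0, edges)).2)
      []
  let s := PySem.List.sorted edges (fun e => e) false
  let fin := s.foldl
    (fun (st : Int × Int × Option Int) e =>
      let rp : Int × Option Int :=
        if some e = st.2.2 then (st.2.1 + 1, st.2.2) else (1, some e)
      (if st.1 < rp.1 then rp.1 else st.1, rp))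
    (0, 0, none)
  (wall.length : Int) - fin.1

-- ===== PRECONDITION & SPEC =====
-- Pre_ excludes exactly the walls with no interior edge (every row has at most one brick): there A's max() raises ValueError.
def Pre_fewest_cuts (wall : List (List Int)) : Prop :=
  (wall.any (fun r => 2 ≤ r.length)) = true
instance (wall : List (List Int)) : Decidable (Pre_fewest_cuts wall) := by unfold Pre_fewest_cuts; infer_instance
def pvWitness_fewest_cuts : List (List Int) := [[1, 2, 3], [3, 3], [6]]

-- On walls where every row has at most one brick A raises ValueError (max() of empty sequence); B returns len(wall).
def Raises_fewest_cuts (wall : List (List Int)) : Prop :=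
  (wall.all (fun r => r.length ≤ 1)) = true
instance (wall : List (List Int)) : Decidable (Raises_fewest_cuts wall) := by unfold Raises_fewest_cuts; infer_instance
def pvRaiseWitness_fewest_cuts : List (List Int) := [[5], [3]]
def pvRaiseWitnessOut_fewest_cuts : Int := 2

def Spec_fewest_cuts (wall : List (List Int)) (out : Int) : Prop := out = fewest_cuts_alt wall
instance (wall : List (List Int)) (out : Int) : Decidable (Spec_fewest_cuts wall out) := by unfold Spec_fewest_cuts; infer_instance

-- ===== CLAIM =====
def Claim_equal_fewest_cuts : Prop := ∀ (wall : List (List Int)), Dom_fewest_cuts wall → Pre_fewest_cuts wall → Spec_fewest_cuts wall (fewest_cuts wall)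
def Claim_raises_fewest_cuts : Prop := (∀ (wall : List (List Int)), Dom_fewest_cuts wall → Raises_fewest_cuts wall → ¬ Pre_fewest_cuts wall) ∧ (Dom_fewest_cuts (pvRaiseWitness_fewest_cuts) ∧ Raises_fewest_cuts (pvRaiseWitness_fewest_cuts) ∧ fewest_cuts_alt (pvRaiseWitness_fewest_cuts) = pvRaiseWitnessOut_fewest_cuts)

-- ===== LEMMAS AND PROOFS =====

-- prefix sums of a row's bricks (the interior edge positions contributed by one row)
def pvPrefs (a : Int) : List Int → List Int
  | [] => []
  | b :: t => (a + b) :: pvPrefs (a + b) t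

-- the flat list of all interior edge positions, row by row
def pvEdges : List (List Int) → List Int
  | [] => []
  | row :: t => pvPrefs 0 (PySem.List.slice row none (some (-1))) ++ pvEdges t

def pvCStep (d : PySem.Dict Int Int) (x : Int) : PySem.Dict Int Int := d.modify x 0 (· + 1)

def pvBStep (st : Int × Int × Option Int) (e : Int) : Int × Int × Option Int :=
  let rp : Int × Option Int :=
    if some e = st.2.2 then (st.2.1 + 1, st.2.2) else (1, some e)
  (if st.1 < rp.1 then rp.1 else st.1, rp)

def pvMOver (b : Int) (f : Int → Int) (s : List Int) : Int :=
  s.foldl (fun a v => max a (f v)) b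

theorem pvIfMax (a c : Int) : (if a < c then c else a) = max a c := by
  rcases lt_or_ge a c with h | h
  · rw [if_pos h]; omega
  · rw [if_neg (not_lt.mpr h)]; omega

theorem pvInnerB (bricks : List Int) (a : Int) (es : List Int) :
    (bricks.foldl (fun (st : Int × List Int) brick => (st.1 + brick, st.2 ++ [st.1 + brick]))
      (a, es)).2 = es ++ pvPrefs a bricks := by
  induction bricks generalizing a es with
  | nil => simp [pvPrefs]
  | cons b t ih => simp only [List.foldl_cons, pvPrefs, ih, List.append_assoc,
      List.singleton_append]

theorem pvAltEdges (wall : List (List Int)) (es : List Int) :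
    wall.foldl (fun edges row =>
      ((PySem.List.slice row none (some (-1))).foldl
        (fun (st : Int × List Int) brick => (st.1 + brick, st.2 ++ [st.1 + brick]))
        (0, edges)).2) es = es ++ pvEdges wall := by
  induction wall generalizing es with
  | nil => simp [pvEdges]
  | cons row t ih =>
    simp only [List.foldl_cons, pvEdges]
    rw [pvInnerB, ih, List.append_assoc]

theorem pvInnerA (bricks : List Int) (a : Int) (d : PySem.Dict Int Int) :
    (bricks.foldl (fun (st : Int × PySem.Dict Int Int) brick =>
      (st.1 + brick, st.2.modify (st.1 + brick) 0 (· + 1))) (a, d)).2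
    = (pvPrefs a bricks).foldl pvCStep d := by
  induction bricks generalizing a d with
  | nil => simp [pvPrefs]
  | cons b t ih => simp only [List.foldl_cons, pvPrefs, ih, pvCStep]

theorem pvADict (wall : List (List Int)) (d : PySem.Dict Int Int) :
    wall.foldl (fun cuts row =>
      ((PySem.List.slice row none (some (-1))).foldl
        (fun (st : Int × PySem.Dict Int Int) brick =>
          (st.1 + brick, st.2.modify (st.1 + brick) 0 (· + 1)))
        (0, cuts)).2) d = (pvEdges wall).foldl pvCStep d := by
  induction wall generalizing d with
  | nil => simp [pvEdges]
  | cons row t ih =>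
    simp only [List.foldl_cons, pvEdges, List.foldl_append]
    rw [pvInnerA, ih]

theorem pvCounter (E : List Int) :
    E.foldl pvCStep PySem.Dict.empty = PySem.Dict.counter E := rfl

theorem pvValuesCounter (E : List Int) :
    (PySem.Dict.counter E).values = (PySem.Set.ofList E).map (fun k => (E.count k : Int)) := by
  simp only [PySem.Dict.values, PySem.Dict.items_counter, List.map_map]
  rfl

-- pvMOver basics
theorem pvMOver_cons (b : Int) (f : Int → Int) (v : Int) (t : List Int) :
    pvMOver b f (v :: t) = pvMOver (max b (f v)) f t := rfl

theorem pvMOver_congr (b : Int) (f g : Int → Int) (t : List Int)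
    (h : ∀ v ∈ t, f v = g v) : pvMOver b f t = pvMOver b g t := by
  induction t generalizing b with
  | nil => rfl
  | cons v t ih =>
    rw [pvMOver_cons, pvMOver_cons, h v (List.mem_cons_self ..)]
    exact ih _ (fun w hw => h w (List.mem_cons_of_mem _ hw))

theorem pvMOver_max_init (b c : Int) (f : Int → Int) (t : List Int) :
    pvMOver (max b c) f t = max (pvMOver b f t) c := by
  induction t generalizing b with
  | nil => rfl
  | cons v t ih =>
    rw [pvMOver_cons, pvMOver_cons, max_right_comm, ih]

theorem pvMOver_init_le (b : Int) (f : Int → Int) (t : List Int) :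
    b ≤ pvMOver b f t := by
  induction t generalizing b with
  | nil => exact le_refl _
  | cons v t ih =>
    rw [pvMOver_cons]
    exact le_trans (le_max_left _ _) (ih _)

theorem pvMOver_mem_le (b : Int) (f : Int → Int) (t : List Int) (v : Int) (hv : v ∈ t) :
    f v ≤ pvMOver b f t := by
  induction t generalizing b with
  | nil => cases hv
  | cons w t ih =>
    rw [pvMOver_cons]
    rcases List.mem_cons.mp hv with h | h
    · subst h; exact le_trans (le_max_right _ _) (pvMOver_init_le _ _ _)
    · exact ih _ h

theorem pvMOver_eq_init_or_mem (b : Int) (f : Int → Int) (t : List Int) :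
    pvMOver b f t = b ∨ ∃ v ∈ t, pvMOver b f t = f v := by
  induction t generalizing b with
  | nil => exact Or.inl rfl
  | cons v t ih =>
    rw [pvMOver_cons]
    rcases ih (max b (f v)) with h | ⟨w, hw, h⟩
    · rcases max_cases b (f v) with ⟨he, _⟩ | ⟨he, _⟩
      · exact Or.inl (h.trans he)
      · exact Or.inr ⟨v, List.mem_cons_self .., h.trans he⟩
    · exact Or.inr ⟨w, List.mem_cons_of_mem _ hw, h⟩

theorem pvMOver_absorb (b k z : Int) (f : Int → Int) (t : List Int)
    (hz : f z = (t.count z : Int) + k) :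
    pvMOver (max b ((t.count z : Int) + k)) f t = pvMOver (max b k) f t := by
  by_cases hm : z ∈ t
  · rw [pvMOver_max_init, pvMOver_max_init]
    have h1 : f z ≤ pvMOver b f t := pvMOver_mem_le b f t z hm
    have hc : (0 : Int) ≤ (t.count z : Int) := Int.natCast_nonneg _
    rw [hz] at h1
    omega
  · rw [List.count_eq_zero.mpr hm]
    norm_num

-- closed form for the run-length scan on a sorted tail, with the running state
theorem pvScanClosed (s : List Int) (hs : s.Pairwise (· ≤ ·)) :
    ∀ (b r x : Int), (∀ y ∈ s, x ≤ y) →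
    (s.foldl pvBStep (b, r, some x)).1
      = pvMOver b (fun v => (s.count v : Int) + if v = x then r else 0) s := by
  induction s with
  | nil => intro b r x _; rfl
  | cons e t ih =>
    intro b r x hx
    have he : ∀ y ∈ t, e ≤ y := fun y hy => (List.pairwise_cons.mp hs).1 y hy
    have ht : t.Pairwise (· ≤ ·) := (List.pairwise_cons.mp hs).2
    rw [List.foldl_cons]
    by_cases hex : e = x
    · subst hex
      have hstep : pvBStep (b, r, some e) e = (max b (r + 1), r + 1, some e) := by
        simp [pvBStep] <;> split_ifs <;> omega
      rw [hstep, ih ht (max b (r + 1)) (r + 1) e he, pvMOver_cons]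
      have hfe : max b ((fun v => ((e :: t).count v : Int) + if v = e then r else 0) e)
          = max b ((t.count e : Int) + (r + 1)) := by
        simp only [List.count_cons_self, if_pos rfl]
        push_cast
        ring_nf
      rw [hfe, pvMOver_absorb b (r + 1) e _ t
        (by simp only [List.count_cons_self]; push_cast; ring)]
      apply pvMOver_congr
      intro v _
      by_cases hv : v = e <;> simp [hv, List.count_cons] <;> push_cast <;> omega
    · have hstep : pvBStep (b, r, some x) e = (max b 1, 1, some e) := by
        simp [pvBStep, hex, pvIfMax]
      have hxt : x ∉ t := by
        intro hmem
        have h1 := he x hmem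
        have h2 := hx e (List.mem_cons_self ..)
        exact hex (le_antisymm h1 h2)
      rw [hstep, ih ht (max b 1) 1 e he, pvMOver_cons]
      have hfe : max b ((fun v => ((e :: t).count v : Int) + if v = x then r else 0) e)
          = max b ((t.count e : Int) + 1) := by
        simp only [List.count_cons_self, if_neg hex]
        push_cast
        ring_nf
      rw [hfe, pvMOver_absorb b 1 e _ t
        (by simp [List.count_cons_self, hex] <;> push_cast <;> omega)]
      apply pvMOver_congr
      intro v hv
      have hvx : v ≠ x := fun h => hxt (h ▸ hv)
      by_cases hve : v = e <;> simp [hve, hvx, hex, List.count_cons] <;> push_cast <;> omega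

-- the scan over a nonempty sorted list computes the maximal multiplicity
theorem pvScanProps (s : List Int) (hne : s ≠ []) (hs : s.Pairwise (· ≤ ·)) :
    (∀ v : Int, (s.count v : Int) ≤ (s.foldl pvBStep (0, 0, none)).1) ∧
    (∃ v ∈ s, (s.foldl pvBStep (0, 0, none)).1 = (s.count v : Int)) := by
  obtain ⟨e, t, rfl⟩ := List.exists_cons_of_ne_nil hne
  have he : ∀ y ∈ t, e ≤ y := fun y hy => (List.pairwise_cons.mp hs).1 y hy
  have ht : t.Pairwise (· ≤ ·) := (List.pairwise_cons.mp hs).2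
  have hstep : pvBStep (0, 0, none) e = (1, 1, some e) := by
    simp [pvBStep]
  rw [List.foldl_cons, hstep, pvScanClosed t ht 1 1 e he]
  have hcongr : pvMOver 1 (fun v => (t.count v : Int) + if v = e then 1 else 0) t
      = pvMOver 1 (fun v => ((e :: t).count v : Int)) t := by
    apply pvMOver_congr
    intro v _
    by_cases hv : v = e <;> simp [hv, List.count_cons] <;> push_cast <;> omega
  rw [hcongr]
  have hce : ∀ w : Int, ((e :: t).count w : Int) ≤ pvMOver 1 (fun v => ((e :: t).count v : Int)) t := by
    intro w
    by_cases hwt : w ∈ t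
    · exact pvMOver_mem_le 1 _ t w hwt
    · have hw1 : (e :: t).count w ≤ 1 := by
        by_cases hwe : w = e
        · subst hwe
          simp [List.count_cons, List.count_eq_zero.mpr hwt]
        · have : (e :: t).count w = 0 := by
            refine List.count_eq_zero.mpr ?_
            simp [hwe, hwt]
          omega
      calc ((e :: t).count w : Int) ≤ 1 := by exact_mod_cast hw1
        _ ≤ _ := pvMOver_init_le 1 _ t
  refine ⟨hce, ?_⟩
  rcases pvMOver_eq_init_or_mem 1 (fun v => ((e :: t).count v : Int)) t with h | ⟨v, hv, h⟩
  · refine ⟨e, List.mem_cons_self .., ?_⟩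
    have h1 : (1 : Int) ≤ ((e :: t).count e : Int) := by
      simp [List.count_cons]
    have h2 := hce e
    rw [h] at h2 ⊢
    omega
  · exact ⟨v, List.mem_cons_of_mem _ hv, h⟩

theorem pvPrefs_ne_nil (a : Int) (bricks : List Int) (h : bricks ≠ []) :
    pvPrefs a bricks ≠ [] := by
  cases bricks with
  | nil => exact absurd rfl h
  | cons b t => simp [pvPrefs]

theorem pvPreEdges (wall : List (List Int)) (h : Pre_fewest_cuts wall) :
    pvEdges wall ≠ [] := by
  induction wall with
  | nil => exact absurd h (by simp [Pre_fewest_cuts])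
  | cons row t ih =>
    unfold Pre_fewest_cuts at h
    rw [List.any_cons] at h
    simp only [pvEdges, ne_eq, List.append_eq_nil_iff, not_and]
    rcases Bool.or_eq_true_iff.mp h with h1 | h2
    · intro hp
      exfalso
      refine pvPrefs_ne_nil 0 _ ?_ hp
      rw [PySem.List.slice_to_neg_one]
      have h2 : 2 ≤ row.length := by simpa using h1
      intro hd
      have := congrArg List.length hd
      simp [List.length_dropLast] at this
      omega
    · intro _
      exact ih h2

-- the core agreement: max dict value = best run of the sorted edges
theorem pvMain (wall : List (List Int)) (h : Pre_fewest_cuts wall) :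
    fewest_cuts wall = fewest_cuts_alt wall := by
  have hE : pvEdges wall ≠ [] := pvPreEdges wall h
  unfold fewest_cuts fewest_cuts_alt
  rw [pvADict, pvAltEdges, pvCounter, List.nil_append]
  set E := pvEdges wall with hEdef
  dsimp only
  rw [pvValuesCounter]
  set vals := (PySem.Set.ofList E).map (fun k => (E.count k : Int)) with hvals
  obtain ⟨e0, t0, hE0⟩ := List.exists_cons_of_ne_nil hE
  have hvne : vals ≠ [] := by
    have hmem : e0 ∈ PySem.Set.ofList E := by
      rw [PySem.Set.mem_ofList, hE0]; exact List.mem_cons_self ..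
    intro hv
    rw [hvals] at hv
    rw [List.map_eq_nil_iff.mp hv] at hmem
    cases hmem
  obtain ⟨m, hm⟩ : ∃ m, PySem.List.max? vals (fun v => v) = some m := by
    cases hmx : PySem.List.max? vals (fun v => v) with
    | none => exact absurd ((PySem.List.max?_eq_none_iff _ _).mp hmx) hvne
    | some m => exact ⟨m, rfl⟩
  rw [hm]
  have hmmem : m ∈ vals := PySem.List.max?_mem hm
  obtain ⟨k0, hk0mem, hk0⟩ : ∃ k ∈ E, m = (E.count k : Int) := by
    rw [hvals] at hmmem
    rcases List.mem_map.mp hmmem with ⟨k, hk, hkeq⟩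
    exact ⟨k, (PySem.Set.mem_ofList ..).mp hk, hkeq.symm⟩
  have hmmax : ∀ k ∈ E, (E.count k : Int) ≤ m := by
    intro k hk
    have hmemv : (E.count k : Int) ∈ vals := by
      rw [hvals]
      exact List.mem_map.mpr ⟨k, (PySem.Set.mem_ofList ..).mpr hk, rfl⟩
    exact PySem.List.max?_isMax hm _ hmemv
  set s := PySem.List.sorted E (fun e => e) false with hsdef
  have hperm : s.Perm E := PySem.List.sorted_perm ..
  have hsp : s.Pairwise (· ≤ ·) := by
    have := PySem.List.sorted_pairwise E (fun e => e)
    simpa using this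
  have hsne : s ≠ [] := by
    intro h0
    rw [hsdef] at h0
    exact hE ((PySem.List.sorted_eq_nil_iff _ _ _).mp h0)
  have hcount : ∀ v : Int, s.count v = E.count v := fun v => hperm.count_eq v
  obtain ⟨hub, v1, hv1mem, hv1⟩ := pvScanProps s hsne hsp
  have hBA : (s.foldl pvBStep (0, 0, none)).1 = m := by
    apply le_antisymm
    · rw [hv1, hcount v1]
      exact hmmax v1 (hperm.mem_iff.mp hv1mem)
    · rw [hk0, ← hcount k0]
      exact hub k0
  show (wall.length : Int) - m = (wall.length : Int) - (s.foldl pvBStep (0, 0, none)).1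
  rw [hBA]

-- the Raises_ region lies outside Pre_
theorem pvRaisesDisjoint (wall : List (List Int)) (hr : Raises_fewest_cuts wall) :
    ¬ Pre_fewest_cuts wall := by
  unfold Raises_fewest_cuts at hr
  unfold Pre_fewest_cuts
  intro hp
  rw [List.any_eq_true] at hp
  rw [List.all_eq_true] at hr
  obtain ⟨r, hr1, hr2⟩ := hp
  have h3 := hr r hr1
  simp only [decide_eq_true_eq] at hr2 h3
  omega

-- ===== VERDICT =====
theorem fewest_cuts_spec : Claim_equal_fewest_cuts := by
  intro wall _ hpre
  unfold Spec_fewest_cuts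
  exact pvMain wall hpre

@[simp] theorem fewest_cuts_raises : Claim_raises_fewest_cuts := by
  unfold Claim_raises_fewest_cuts
  exact ⟨fun wall _ hr => pvRaisesDisjoint wall hr, by decide⟩
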